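-- pv_equiv track=rewrite | github.com/piedro404/resolucoes-de-problemas | Uri/Strings/Concurso de Contos.py | creatorPage
-- ===== SOURCE A (Python) =====
-- def creatorPage(conto):
--     listaPalavras = []
--     pal = ''
--     for x in conto:
--         if x == " ":
--             listaPalavras.append(pal)
--             listaPalavras.append(" ")
--             pal = ''
--         else:
--             pal+=x
--
--     listaPalavras.append(pal)
--
--     return listaPalavras
-- ===== SOURCE B (Python) =====
-- def creatorPage(conto):
--     parts = conto.split(" ")
--     result = []
--     for i, p in enumerate(parts):
--         if i > 0:
--             result.append(" ")
--         result.append(p)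
--     return result
-- ===== Notes on version B (the rewrite author's own statement) =====
-- stated objective: faster
-- what changed: B replaces A's character-by-character scan with its quadratic word accumulator by a single str.split on the space separator followed by interleaving standalone space tokens between consecutive parts.
import Mathlib
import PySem

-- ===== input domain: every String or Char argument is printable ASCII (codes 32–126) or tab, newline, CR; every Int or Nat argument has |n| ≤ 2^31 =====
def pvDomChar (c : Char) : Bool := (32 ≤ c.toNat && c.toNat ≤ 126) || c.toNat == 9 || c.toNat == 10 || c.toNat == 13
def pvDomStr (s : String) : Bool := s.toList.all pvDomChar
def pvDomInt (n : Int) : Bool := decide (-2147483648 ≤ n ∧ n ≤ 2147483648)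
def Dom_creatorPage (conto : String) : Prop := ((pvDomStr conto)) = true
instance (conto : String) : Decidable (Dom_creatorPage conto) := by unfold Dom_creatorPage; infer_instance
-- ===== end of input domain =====

-- B replaces A's character-by-character scan with split(" ") followed by interleaving " " tokens (idiomatic).

-- ===== PORT A =====
-- the loop state: (listaPalavras, pal)
def creatorPage (conto : String) : List String :=
  let st := conto.toList.foldl
    (fun (st : List String × List Char) x =>
      if x = ' ' then (st.1 ++ [String.ofList st.2, " "], [])
      else (st.1, st.2 ++ [x]))
    ([], [])
  st.1 ++ [String.ofList st.2]

-- ===== PORT B =====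
def creatorPage_alt (conto : String) : List String :=
  let parts := (PySem.Chars.splitOn conto.toList [' ']).map String.ofList
  (PySem.List.enumerate parts).foldl
    (fun (result : List String) (ip : Int × String) =>
      (if ip.1 > 0 then result ++ [" "] else result) ++ [ip.2])
    []

-- ===== PRECONDITION & SPEC =====
def Spec_creatorPage (conto : String) (out : List String) : Prop := out = creatorPage_alt conto
instance (conto : String) (out : List String) : Decidable (Spec_creatorPage conto out) := by unfold Spec_creatorPage; infer_instance

-- ===== CLAIM (what is proved, stated in full; the proofs are below) =====
def Claim_equal_creatorPage : Prop := ∀ (conto : String), Dom_creatorPage conto → Spec_creatorPage conto (creatorPage conto)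

-- ===== LEMMAS AND PROOFS =====

-- reference splitter: split on single space, accumulating the current word at the front
def pvSplit1 (pre : List Char) : List Char → List (List Char)
  | [] => [pre]
  | c :: rest => if c = ' ' then pre :: pvSplit1 [] rest else pvSplit1 (pre ++ [c]) rest

theorem pvSplit1_ne_nil (pre : List Char) (l : List Char) : pvSplit1 pre l ≠ [] := by
  induction l generalizing pre with
  | nil => simp [pvSplit1]
  | cons c rest ih => by_cases h : c = ' ' <;> simp [pvSplit1, h, ih]

-- PySem.Chars.splitOn with sep = [' '] computes pvSplit1
theorem splitOn_go_eq (l : List Char) : ∀ (fuel : Nat) (cur : List Char) (acc : List (List Char)),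
    l.length < fuel →
    PySem.Chars.splitOn.go [' '] fuel l cur acc = acc.reverse ++ pvSplit1 cur.reverse l := by
  induction l with
  | nil =>
    intro fuel cur acc h
    match fuel with
    | fuel + 1 => simp [PySem.Chars.splitOn.go, pvSplit1]
  | cons c rest ih =>
    intro fuel cur acc h
    match fuel with
    | fuel + 1 =>
      by_cases hc : c = ' '
      · subst hc
        rw [show PySem.Chars.splitOn.go [' '] (fuel+1) (' ' :: rest) cur acc
              = PySem.Chars.splitOn.go [' '] fuel rest [] (cur.reverse :: acc) by
            simp [PySem.Chars.splitOn.go, List.isPrefixOf]]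
        rw [ih fuel [] (cur.reverse :: acc) (by simpa using Nat.lt_of_succ_lt_succ h)]
        simp [pvSplit1]
      · rw [show PySem.Chars.splitOn.go [' '] (fuel+1) (c :: rest) cur acc
              = PySem.Chars.splitOn.go [' '] fuel rest (c :: cur) acc by
            simp [PySem.Chars.splitOn.go, List.isPrefixOf, Ne.symm hc]]
        rw [ih fuel (c :: cur) acc (by simpa using Nat.lt_of_succ_lt_succ h)]
        simp [pvSplit1, hc]

theorem splitOn_eq (s : List Char) : PySem.Chars.splitOn s [' '] = pvSplit1 [] s := by
  unfold PySem.Chars.splitOn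
  rw [splitOn_go_eq s (s.length + 1) [] [] (Nat.lt_succ_self _)]
  simp

-- A's loop step, named for the proofs (definitionally the lambda in creatorPage)
def pvStep (st : List String × List Char) (x : Char) : List String × List Char :=
  if x = ' ' then (st.1 ++ [String.ofList st.2, " "], []) else (st.1, st.2 ++ [x])

-- A's loop computes the interspersed form of pvSplit1
theorem creatorPage_loop_eq (l : List Char) :
    ∀ (lst : List String) (pal : List Char),
    (l.foldl pvStep (lst, pal)).1 ++ [String.ofList (l.foldl pvStep (lst, pal)).2]
    = lst ++ List.intersperse " " ((pvSplit1 pal l).map String.ofList) := by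
  induction l with
  | nil => intro lst pal; simp [pvSplit1]
  | cons c rest ih =>
    intro lst pal
    by_cases hc : c = ' '
    · subst hc
      simp only [List.foldl_cons]
      rw [show pvStep (lst, pal) ' ' = (lst ++ [String.ofList pal, " "], []) from by
        simp [pvStep]]
      rw [ih (lst ++ [String.ofList pal, " "]) []]
      have hne : (pvSplit1 [] rest).map String.ofList ≠ [] := by
        simp [pvSplit1_ne_nil]
      obtain ⟨q, qs, hq⟩ := List.exists_cons_of_ne_nil hne
      simp [pvSplit1, hq]
    · simp only [List.foldl_cons]
      rw [show pvStep (lst, pal) c = (lst, pal ++ [c]) from by simp [pvStep, hc]]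
      rw [ih lst (pal ++ [c])]
      simp [pvSplit1, hc]

-- B's loop is intersperse " "
theorem enum_fold_eq (ps : List String) :
    ∀ (acc : List String) (start : Int), 1 ≤ start →
    (PySem.List.enumerate ps start).foldl
      (fun (result : List String) (ip : Int × String) =>
        (if ip.1 > 0 then result ++ [" "] else result) ++ [ip.2]) acc
    = acc ++ ps.flatMap (fun p => [" ", p]) := by
  induction ps with
  | nil => intro acc start _; simp [PySem.List.enumerate]
  | cons p rest ih =>
    intro acc start hs
    simp only [PySem.List.enumerate, List.foldl_cons]
    rw [if_pos (by omega)]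
    rw [ih (acc ++ [" "] ++ [p]) (start + 1) (by omega)]
    simp

theorem intersperse_eq_flatMap (ps : List String) :
    List.intersperse " " ps = match ps with
      | [] => []
      | p :: rest => p :: rest.flatMap (fun q => [" ", q]) := by
  match ps with
  | [] => rfl
  | p :: rest =>
    induction rest generalizing p with
    | nil => rfl
    | cons q qs ih => simp [List.intersperse, ih q]

-- ===== VERDICT (by name: the statement is the Claim_ definition above) =====
theorem creatorPage_spec : Claim_equal_creatorPage := by
  intro conto _
  unfold Spec_creatorPage creatorPage creatorPage_alt
  show (conto.toList.foldl pvStep ([], [])).1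
      ++ [String.ofList (conto.toList.foldl pvStep ([], [])).2] = _
  rw [splitOn_eq, creatorPage_loop_eq conto.toList [] []]
  have hne : (pvSplit1 [] conto.toList).map String.ofList ≠ [] := by
    simp [pvSplit1_ne_nil]
  obtain ⟨q, qs, hq⟩ := List.exists_cons_of_ne_nil hne
  rw [hq, intersperse_eq_flatMap]
  simp only [PySem.List.enumerate, List.foldl_cons, List.nil_append,
    if_neg (by omega : ¬ (0:Int) > 0)]
  rw [enum_fold_eq qs [q] (0 + 1) (by norm_num)]
  simp
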